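-- pv_equiv track=rewrite | github.com/danila-kopitayko/Algorithms | Sorting and hash/find_difference.py | solution
-- ===== SOURCE A (Python) =====
-- from collections import Counter
--
-- def solution(a,b):
--     a=Counter(list(a))
--     b=Counter(list(b))
--     keys = list(a.keys())
--     for value in keys:
--         if value in b.keys():
--             del a[value]
--             del b[value]
--     if b.keys():
--         return list(b.keys())[0]
--     else:
--         return list(a.keys())[0]
-- ===== SOURCE B (Python) =====
-- def solution(a, b):
--     la, lb = list(a), list(b)
--     sa, sb = set(la), set(lb)
--     rb = [v for v in lb if v not in sa]
--     if rb:
--         return rb[0]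
--     ra = [v for v in la if v not in sb]
--     return ra[0]
-- ===== Notes on version B (the rewrite author's own statement) =====
-- stated objective: simpler
-- what changed: Replaces A's Counter construction plus a key-iteration loop that mutates and deletes from both counters with two direct membership-filtered scans of the original lists against precomputed sets.
import Mathlib
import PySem

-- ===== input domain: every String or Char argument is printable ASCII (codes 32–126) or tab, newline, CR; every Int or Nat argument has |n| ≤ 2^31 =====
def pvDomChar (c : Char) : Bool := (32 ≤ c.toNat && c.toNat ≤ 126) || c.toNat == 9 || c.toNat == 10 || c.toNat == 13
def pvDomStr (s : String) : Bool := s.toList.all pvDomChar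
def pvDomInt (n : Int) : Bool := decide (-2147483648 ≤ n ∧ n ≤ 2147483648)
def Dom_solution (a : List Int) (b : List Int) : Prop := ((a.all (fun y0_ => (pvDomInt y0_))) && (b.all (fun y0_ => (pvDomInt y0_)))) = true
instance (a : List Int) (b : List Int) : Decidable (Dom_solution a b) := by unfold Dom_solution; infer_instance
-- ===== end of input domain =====

-- B replaces A's Counter-mutation-and-delete loop with two membership-filtered scans
-- over sets, for simplicity; equal on Pre_ (where Python A returns without raising).

-- ===== PORT A =====
-- the body of A's 'for value in keys' loop (state = the pair of counters)
def pvStepA (s : PySem.Dict Int Int × PySem.Dict Int Int) (v : Int) :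
    PySem.Dict Int Int × PySem.Dict Int Int :=
  if s.2.contains v then (s.1.erase v, s.2.erase v) else s

def solution (a : List Int) (b : List Int) : Int :=
  let ca := PySem.Dict.counter a          -- a = Counter(list(a))
  let cb := PySem.Dict.counter b          -- b = Counter(list(b))
  let keys := ca.keys                     -- keys = list(a.keys())
  let r := keys.foldl pvStepA (ca, cb)    -- the for loop with its del statements
  if r.2.keys ≠ [] then r.2.keys.headD 0  -- list(b.keys())[0]; [] raises IndexError, excluded by Pre_
  else r.1.keys.headD 0                   -- list(a.keys())[0]; [] raises IndexError, excluded by Pre_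

-- ===== PORT B =====
def solution_alt (a : List Int) (b : List Int) : Int :=
  let sa : PySem.Set Int := PySem.Set.ofList a
  let sb : PySem.Set Int := PySem.Set.ofList b
  let rb := b.filter (fun v => !(PySem.Set.contains sa v))
  match rb with
  | v :: _ => v
  | [] => (a.filter (fun v => !(PySem.Set.contains sb v))).headD 0  -- ra[0]; [] raises IndexError, excluded by Pre_

-- ===== PRECONDITION & SPEC =====
-- Pre_ excludes exactly the inputs where both collections hold the same set of values:
-- there Python A (and B) raises IndexError.
def Pre_solution (a : List Int) (b : List Int) : Prop :=
  (∃ v ∈ b, v ∉ a) ∨ (∃ v ∈ a, v ∉ b)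
instance (a : List Int) (b : List Int) : Decidable (Pre_solution a b) := by
  unfold Pre_solution; infer_instance
def pvWitness_solution : List Int × List Int := ([1, 2], [1, 3])

def Spec_solution (a : List Int) (b : List Int) (out : Int) : Prop := out = solution_alt a b
instance (a : List Int) (b : List Int) (out : Int) : Decidable (Spec_solution a b out) := by unfold Spec_solution; infer_instance

-- ===== CLAIM (what is proved, stated in full; the proofs are below) =====
def Claim_equal_solution : Prop := ∀ (a : List Int) (b : List Int), Dom_solution a b → Pre_solution a b → Spec_solution a b (solution a b)

-- ===== LEMMAS AND PROOFS =====

lemma pv_keys_erase (d : PySem.Dict Int Int) (v : Int) :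
    (d.erase v).keys = d.keys.filter (fun k => !(k == v)) := by
  show List.map Prod.fst (List.filter (fun p => !(p.1 == v)) d.items) = _
  have hcomp : (fun (p : Int × Int) => !(p.1 == v)) = ((fun k => !(k == v)) ∘ Prod.fst) := rfl
  rw [hcomp, ← List.filter_map]
  rfl

-- (d.erase v).contains x, in terms of d
lemma pv_contains_erase (d : PySem.Dict Int Int) (v x : Int) :
    (d.erase v).contains x = (d.contains x && !(x == v)) := by
  rw [PySem.Dict.contains_eq_decide_mem_keys, PySem.Dict.contains_eq_decide_mem_keys,
      pv_keys_erase]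
  by_cases h : x = v <;> simp [h, List.mem_filter]

lemma pv_not_contains_key (d : PySem.Dict Int Int) (v : Int) (h : d.contains v = false)
    (p : Int × Int) (hp : p ∈ d.items) : p.1 ≠ v := by
  intro he
  have hc : d.contains p.1 = true := by
    rw [PySem.Dict.contains_eq_decide_mem_keys]
    simp only [PySem.Dict.keys, List.mem_map, decide_eq_true_eq]
    exact ⟨p, hp, rfl⟩
  rw [he, h] at hc
  exact Bool.false_ne_true hc

-- characterisation of A's deletion loop
lemma pv_fold_items (ks : List Int) (hnd : ks.Nodup) (d1 d2 : PySem.Dict Int Int) :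
    (ks.foldl pvStepA (d1, d2)).1.items
        = d1.items.filter (fun p => !(decide (p.1 ∈ ks) && d2.contains p.1)) ∧
    (ks.foldl pvStepA (d1, d2)).2.items
        = d2.items.filter (fun p => !decide (p.1 ∈ ks)) := by
  induction ks generalizing d1 d2 with
  | nil => simp
  | cons v t ih =>
    have hv : v ∉ t := (List.nodup_cons.mp hnd).1
    have hnd' : t.Nodup := (List.nodup_cons.mp hnd).2
    simp only [List.foldl_cons]
    by_cases h : d2.contains v = true
    · rw [show pvStepA (d1, d2) v = (d1.erase v, d2.erase v) from by simp [pvStepA, h]]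
      obtain ⟨ih1, ih2⟩ := ih hnd' (d1.erase v) (d2.erase v)
      constructor
      · rw [ih1]
        show (List.filter _ (List.filter (fun p => !(p.1 == v)) d1.items)) = _
        rw [List.filter_filter]
        apply List.filter_congr
        intro p _
        by_cases hx : p.1 = v
        · simp [hx, h]
        · have hx' : (p.1 == v) = false := by simp [hx]
          simp [hx, hx', pv_contains_erase, List.mem_cons]
      · rw [ih2]
        show (List.filter _ (List.filter (fun p => !(p.1 == v)) d2.items)) = _
        rw [List.filter_filter]
        apply List.filter_congr
        intro p _
        by_cases hx : p.1 = v <;> simp [hx, List.mem_cons]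
    · rw [show pvStepA (d1, d2) v = (d1, d2) from by simp [pvStepA, h]]
      obtain ⟨ih1, ih2⟩ := ih hnd' d1 d2
      have h' : d2.contains v = false := by simpa using h
      constructor
      · rw [ih1]
        apply List.filter_congr
        intro p _
        by_cases hx : p.1 = v
        · simp [hx, h', List.mem_cons]
        · simp [hx, List.mem_cons]
      · rw [ih2]
        apply List.filter_congr
        intro p hp
        have hne := pv_not_contains_key d2 v h' p hp
        simp [List.mem_cons, hne]

-- Set.ofList appends, never removes: the head is preserved
lemma pv_foldl_add_prefix (l : List Int) (s : List Int) :
    ∃ r, l.foldl PySem.Set.add s = s ++ r := by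
  induction l generalizing s with
  | nil => exact ⟨[], by simp⟩
  | cons x t ih =>
    simp only [List.foldl_cons]
    obtain ⟨r, hr⟩ := ih (PySem.Set.add s x)
    by_cases h : PySem.Set.contains s x = true
    · have ha : PySem.Set.add s x = s := by rw [PySem.Set.add, if_pos h]
      refine ⟨r, ?_⟩
      rw [ha] at hr ⊢
      exact hr
    · have ha : PySem.Set.add s x = s ++ [x] := by rw [PySem.Set.add, if_neg h]
      refine ⟨[x] ++ r, ?_⟩
      rw [hr, ha, List.append_assoc]

lemma pv_ofList_head? (l : List Int) : (PySem.Set.ofList l).head? = l.head? := by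
  cases l with
  | nil => rfl
  | cons x t =>
    show ((x :: t).foldl PySem.Set.add PySem.Set.empty).head? = _
    rw [List.foldl_cons]
    obtain ⟨r, hr⟩ := pv_foldl_add_prefix t (PySem.Set.add PySem.Set.empty x)
    have hx : PySem.Set.add PySem.Set.empty x = [x] := rfl
    rw [hx] at hr
    simp [hr]

lemma pv_add_filter (s : List Int) (x : Int) (p : Int → Bool) :
    (PySem.Set.add s x).filter p
      = if p x then PySem.Set.add (s.filter p) x else s.filter p := by
  by_cases h : PySem.Set.contains s x = true
  · have hm : x ∈ s := by
      simpa [PySem.Set.contains, List.contains_eq_mem] using h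
    rw [PySem.Set.add, if_pos h]
    by_cases hp : p x = true
    · have hc : PySem.Set.contains (s.filter p) x = true := by
        simp [PySem.Set.contains, List.contains_eq_mem, List.mem_filter, hm, hp]
      rw [if_pos hp, PySem.Set.add, if_pos hc]
    · rw [if_neg hp]
  · have hm : x ∉ s := by
      simpa [PySem.Set.contains, List.contains_eq_mem] using h
    rw [PySem.Set.add, if_neg h, List.filter_append]
    by_cases hp : p x = true
    · rw [if_pos hp, PySem.Set.add,
         if_neg (by
           simp [PySem.Set.contains, List.contains_eq_mem, List.mem_filter]
           exact fun hxs => absurd hxs hm)]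
      simp [hp]
    · have hp' : p x = false := by simpa using hp
      rw [if_neg hp]
      simp [hp']

-- filtering commutes with set construction (first-occurrence order is preserved)
lemma pv_foldl_add_filter (l : List Int) (p : Int → Bool) (s : List Int) :
    (l.foldl PySem.Set.add s).filter p = (l.filter p).foldl PySem.Set.add (s.filter p) := by
  induction l generalizing s with
  | nil => simp
  | cons x t ih =>
    simp only [List.foldl_cons, List.filter_cons]
    rw [ih, pv_add_filter]
    by_cases hp : p x = true
    · rw [if_pos hp]
      simp [hp]
    · rw [if_neg hp]
      simp [hp]

lemma pv_ofList_filter (l : List Int) (p : Int → Bool) :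
    (PySem.Set.ofList l).filter p = PySem.Set.ofList (l.filter p) := by
  show (l.foldl PySem.Set.add PySem.Set.empty).filter p = _
  rw [pv_foldl_add_filter]
  rfl

lemma pv_main (a b : List Int) : solution a b = solution_alt a b := by
  obtain ⟨h1, h2⟩ := pv_fold_items (PySem.Dict.counter a).keys
      (PySem.Dict.nodup_keys_counter a) (PySem.Dict.counter a) (PySem.Dict.counter b)
  have hk2 : ((PySem.Dict.counter a).keys.foldl pvStepA
        (PySem.Dict.counter a, PySem.Dict.counter b)).2.keys
      = PySem.Set.ofList (b.filter (fun v => !(PySem.Set.contains (PySem.Set.ofList a) v))) := by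
    show List.map Prod.fst (((PySem.Dict.counter a).keys.foldl pvStepA _).2.items) = _
    rw [h2]
    have hcomp : (fun (p : Int × Int) => !decide (p.1 ∈ (PySem.Dict.counter a).keys))
        = ((fun k => !decide (k ∈ (PySem.Dict.counter a).keys)) ∘ Prod.fst) := rfl
    rw [hcomp, ← List.filter_map]
    show ((PySem.Dict.counter b).keys.filter _) = _
    rw [PySem.Dict.keys_counter, PySem.Dict.keys_counter, pv_ofList_filter]
    congr 1
    apply List.filter_congr
    intro v _
    simp [PySem.Set.contains, List.contains_eq_mem, PySem.Set.mem_ofList]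
  have hk1 : ((PySem.Dict.counter a).keys.foldl pvStepA
        (PySem.Dict.counter a, PySem.Dict.counter b)).1.keys
      = PySem.Set.ofList (a.filter (fun v => !(PySem.Set.contains (PySem.Set.ofList b) v))) := by
    show List.map Prod.fst (((PySem.Dict.counter a).keys.foldl pvStepA _).1.items) = _
    rw [h1]
    have hcomp : (fun (p : Int × Int) =>
          !(decide (p.1 ∈ (PySem.Dict.counter a).keys) && (PySem.Dict.counter b).contains p.1))
        = ((fun k => !(decide (k ∈ (PySem.Dict.counter a).keys)
            && (PySem.Dict.counter b).contains k)) ∘ Prod.fst) := rfl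
    rw [hcomp, ← List.filter_map]
    show ((PySem.Dict.counter a).keys.filter _) = _
    rw [PySem.Dict.keys_counter, pv_ofList_filter]
    congr 1
    apply List.filter_congr
    intro v hv
    have hva : v ∈ a := hv
    simp [PySem.Dict.contains_counter, PySem.Set.contains,
          List.contains_eq_mem, PySem.Set.mem_ofList]
    exact fun hna => absurd hva hna
  simp only [solution, solution_alt]
  rw [hk1, hk2]
  cases hb : b.filter (fun v => !(PySem.Set.contains (PySem.Set.ofList a) v)) with
  | cons v t =>
    have hh := pv_ofList_head? (v :: t)
    have hne : PySem.Set.ofList (v :: t) ≠ [] := by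
      intro h0
      rw [h0] at hh
      simp at hh
    rw [if_pos hne, List.headD_eq_head?_getD, hh]
    rfl
  | nil =>
    rw [if_neg (by simp [PySem.Set.ofList, PySem.Set.empty])]
    rw [List.headD_eq_head?_getD, pv_ofList_head?, ← List.headD_eq_head?_getD]

-- ===== VERDICT (by name: the statement is the Claim_ definition above) =====
theorem solution_spec : Claim_equal_solution := by
  intro a b _ _
  unfold Spec_solution
  exact pv_main a b
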